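-- pv_equiv track=rewrite | github.com/Jlei61/HFOsp | src/event_periodicity.py | match_bipolar_focus_rel
-- ===== SOURCE A (Python) =====
-- from typing import Any, Dict, List, Optional, Sequence, Tuple
--
-- def _normalize_channel_name(name: str) -> str:
--     """Strip whitespace, uppercase, remove known prefixes."""
--     s = name.strip().upper()
--     for prefix in ("EEG ", "EEG_"):
--         if s.startswith(prefix):
--             s = s[len(prefix):]
--     return s
--
-- def match_bipolar_focus_rel(
--     ch_name: str, focus_rel: Dict[str, list]
-- ) -> str:
--     """Match bipolar channel to Epilepsiae i/l/e; priority i > l > e."""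
--     normalized = _normalize_channel_name(ch_name)
--     parts = [p.strip() for p in normalized.split("-")]
--     for label in ("i", "l", "e"):
--         label_set = {_normalize_channel_name(c) for c in focus_rel.get(label, [])}
--         for p in parts:
--             if p in label_set:
--                 return label
--     return "unknown"
-- ===== SOURCE B (Python) =====
-- def _norm(name: str) -> str:
--     s = name.strip().upper()
--     if s.startswith("EEG "):
--         s = s[4:]
--     if s.startswith("EEG_"):
--         s = s[4:]
--     return s
--
-- def match_bipolar_focus_rel(ch_name, focus_rel):
--     # Build one inverted index: normalized candidate -> best (smallest) priority.
--     # Iterating labels in priority order means the first insertion is the minimum.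
--     idx = {}
--     for pr, label in enumerate(("i", "l", "e")):
--         for c in focus_rel.get(label, []):
--             n = _norm(c)
--             if n not in idx:
--                 idx[n] = pr
--     best = 3
--     for p in _norm(ch_name).split("-"):
--         best = min(best, idx.get(p.strip(), 3))
--     return ("i", "l", "e", "unknown")[best]
-- ===== Notes on version B (the rewrite author's own statement) =====
-- stated objective: simpler
-- what changed: Replaces the per-label set construction with repeated membership scans by one inverted index built once (normalized candidate -> best priority, first insertion wins since labels are visited in priority order) plus a single min-fold over the channel parts.
import Mathlib
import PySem

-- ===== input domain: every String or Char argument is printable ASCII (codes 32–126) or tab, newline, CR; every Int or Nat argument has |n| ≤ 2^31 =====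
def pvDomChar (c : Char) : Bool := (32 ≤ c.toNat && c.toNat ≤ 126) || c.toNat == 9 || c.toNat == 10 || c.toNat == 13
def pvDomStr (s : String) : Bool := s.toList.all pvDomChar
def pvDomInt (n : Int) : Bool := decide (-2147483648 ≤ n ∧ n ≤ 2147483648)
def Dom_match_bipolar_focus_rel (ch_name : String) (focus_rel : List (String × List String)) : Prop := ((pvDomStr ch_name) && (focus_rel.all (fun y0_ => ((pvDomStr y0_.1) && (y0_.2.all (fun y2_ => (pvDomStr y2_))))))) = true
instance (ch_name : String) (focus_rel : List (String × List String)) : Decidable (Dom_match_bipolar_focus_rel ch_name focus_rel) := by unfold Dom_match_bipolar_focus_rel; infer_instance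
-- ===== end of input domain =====

-- B builds one inverted index (normalized candidate -> best priority) and takes a single
-- min-fold over the channel parts, instead of A's per-label set build + membership scan.

-- ===== PORT A =====
def pvNormA (name : String) : String :=
  ["EEG ", "EEG_"].foldl
    (fun s pre => if PySem.Str.startswith s pre then PySem.Str.slice s (some (PySem.Str.len pre)) none else s)
    (PySem.Str.upper (PySem.Str.strip name))

def match_bipolar_focus_rel (ch_name : String) (focus_rel : List (String × List String)) : String :=
  let normalized := pvNormA ch_name
  let parts := ((PySem.Str.split? normalized "-").getD []).map PySem.Str.strip
  let tryLabel := fun (label : String) =>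
    let labelSet : PySem.Set String := PySem.Set.ofList (((focus_rel.lookup label).getD []).map pvNormA)
    parts.any (fun p => PySem.Set.contains labelSet p)
  if tryLabel "i" then "i"
  else if tryLabel "l" then "l"
  else if tryLabel "e" then "e"
  else "unknown"

-- ===== PORT B =====
def pvNormB (name : String) : String :=
  let s := PySem.Str.upper (PySem.Str.strip name)
  let s := if PySem.Str.startswith s "EEG " then PySem.Str.slice s (some 4) none else s
  let s := if PySem.Str.startswith s "EEG_" then PySem.Str.slice s (some 4) none else s
  s

def pvBuildIdx (focus_rel : List (String × List String)) : PySem.Dict String Int :=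
  [("i", (0 : Int)), ("l", (1 : Int)), ("e", (2 : Int))].foldl
    (fun idx pl =>
      ((focus_rel.lookup pl.1).getD []).foldl
        (fun idx c =>
          let n := pvNormB c
          if idx.contains n then idx else idx.insert n pl.2)
        idx)
    PySem.Dict.empty

def match_bipolar_focus_rel_alt (ch_name : String) (focus_rel : List (String × List String)) : String :=
  let idx := pvBuildIdx focus_rel
  let best := ((PySem.Str.split? (pvNormB ch_name) "-").getD []).foldl
    (fun b p => min b (idx.getD (PySem.Str.strip p) 3)) 3
  (PySem.List.pyGet? ["i", "l", "e", "unknown"] best).getD "unknown"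

-- ===== PRECONDITION & SPEC =====
def Spec_match_bipolar_focus_rel (ch_name : String) (focus_rel : List (String × List String)) (out : String) : Prop := out = match_bipolar_focus_rel_alt ch_name focus_rel
instance (ch_name : String) (focus_rel : List (String × List String)) (out : String) : Decidable (Spec_match_bipolar_focus_rel ch_name focus_rel out) := by unfold Spec_match_bipolar_focus_rel; infer_instance

-- ===== CLAIM (what is proved, stated in full; the proofs are below) =====
def Claim_equal_match_bipolar_focus_rel : Prop := ∀ (ch_name : String) (focus_rel : List (String × List String)), Dom_match_bipolar_focus_rel ch_name focus_rel → Spec_match_bipolar_focus_rel ch_name focus_rel (match_bipolar_focus_rel ch_name focus_rel)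

-- ===== LEMMAS AND PROOFS =====

theorem pvNorm_eq (name : String) : pvNormA name = pvNormB name := by
  have h1 : ("EEG ".length : Int) = 4 := rfl
  have h2 : ("EEG_".length : Int) = 4 := rfl
  simp [pvNormA, pvNormB, PySem.Str.len, h1, h2]

-- the inner fold of pvBuildIdx, named for the lemmas
def pvIns (pr : Int) (idx : PySem.Dict String Int) (cs : List String) : PySem.Dict String Int :=
  cs.foldl (fun idx c =>
    let n := pvNormB c
    if idx.contains n then idx else idx.insert n pr) idx

theorem pvIns_cons (pr : Int) (idx : PySem.Dict String Int) (c : String) (cs : List String) :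
    pvIns pr idx (c :: cs) =
      pvIns pr (if idx.contains (pvNormB c) then idx else idx.insert (pvNormB c) pr) cs := rfl

theorem pvIns_cons_mem (pr : Int) (idx : PySem.Dict String Int) (c : String) (cs : List String)
    (hc : idx.contains (pvNormB c) = true) : pvIns pr idx (c :: cs) = pvIns pr idx cs := by
  rw [pvIns_cons, if_pos hc]

theorem pvIns_cons_new (pr : Int) (idx : PySem.Dict String Int) (c : String) (cs : List String)
    (hc : idx.contains (pvNormB c) = false) :
    pvIns pr idx (c :: cs) = pvIns pr (idx.insert (pvNormB c) pr) cs := by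
  rw [pvIns_cons, if_neg (by simp [hc])]

theorem pvIns_get? (pr : Int) (cs : List String) (idx : PySem.Dict String Int) (n : String) :
    (pvIns pr idx cs).get? n =
      if idx.contains n then idx.get? n
      else if n ∈ cs.map pvNormB then some pr else none := by
  induction cs generalizing idx with
  | nil =>
    by_cases h : idx.contains n
    · simp [pvIns, h]
    · simp [pvIns, h, (PySem.Dict.get?_eq_none_iff_contains _ _).mpr (Bool.not_eq_true _ |>.mp h)]
  | cons c cs ih =>
    rcases hc : idx.contains (pvNormB c) with _ | _
    · rw [pvIns_cons_new pr idx c cs hc, ih]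
      by_cases hn : n = pvNormB c
      · simp [hn, hc]
      · simp [hn, PySem.Dict.contains_insert, PySem.Dict.get?_insert]
    · rw [pvIns_cons_mem pr idx c cs hc, ih]
      by_cases hn : n = pvNormB c
      · simp [hn, hc]
      · simp [hn]

theorem pvIns_contains (pr : Int) (cs : List String) (idx : PySem.Dict String Int) (m : String) :
    (pvIns pr idx cs).contains m = (idx.contains m || decide (m ∈ cs.map pvNormB)) := by
  induction cs generalizing idx with
  | nil => simp [pvIns]
  | cons c cs ih =>
    rcases hc : idx.contains (pvNormB c) with _ | _
    · rw [pvIns_cons_new pr idx c cs hc, ih]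
      by_cases hn : m = pvNormB c
      · simp [hn]
      · have hb : (m == pvNormB c) = false := by simp [hn]
        simp [PySem.Dict.contains_insert, hb, hn]
    · rw [pvIns_cons_mem pr idx c cs hc, ih]
      by_cases hn : m = pvNormB c
      · simp [hn, hc]
      · simp [hn]

theorem pvIns_getD (pr : Int) (cs : List String) (idx : PySem.Dict String Int) (n : String) :
    (pvIns pr idx cs).getD n 3 =
      if idx.contains n then idx.getD n 3
      else if n ∈ cs.map pvNormB then pr else 3 := by
  rw [PySem.Dict.getD_eq_get?_getD, PySem.Dict.getD_eq_get?_getD, pvIns_get?]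
  split_ifs <;> simp

-- candidate name sets, normalized
def pvS (focus_rel : List (String × List String)) (label : String) : List String :=
  ((focus_rel.lookup label).getD []).map pvNormB

theorem pvBuildIdx_getD (fr : List (String × List String)) (n : String) :
    (pvBuildIdx fr).getD n 3 =
      if n ∈ pvS fr "i" then 0
      else if n ∈ pvS fr "l" then 1
      else if n ∈ pvS fr "e" then 2 else 3 := by
  have h : pvBuildIdx fr =
      pvIns 2 (pvIns 1 (pvIns 0 PySem.Dict.empty ((fr.lookup "i").getD []))
        ((fr.lookup "l").getD [])) ((fr.lookup "e").getD []) := rfl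
  rw [h, pvIns_getD, pvIns_contains, pvIns_contains, pvIns_getD, pvIns_contains,
    pvIns_getD]
  simp only [PySem.Dict.contains_empty, PySem.Dict.getD_empty, Bool.false_or, pvS]
  by_cases h1 : n ∈ ((fr.lookup "i").getD []).map pvNormB <;>
    by_cases h2 : n ∈ ((fr.lookup "l").getD []).map pvNormB <;>
      by_cases h3 : n ∈ ((fr.lookup "e").getD []).map pvNormB <;> simp [h1, h2, h3]

-- min-fold bounds
theorem foldl_min_le_init (l : List Int) (a : Int) : l.foldl min a ≤ a := by
  induction l generalizing a with
  | nil => simp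
  | cons x xs ih => exact le_trans (ih (min a x)) (min_le_left _ _)

theorem foldl_min_le_of_mem : ∀ (l : List Int) (a x : Int), x ∈ l → l.foldl min a ≤ x := by
  intro l
  induction l with
  | nil => intro a x hx; simp at hx
  | cons y ys ih =>
    intro a x hx
    rcases List.mem_cons.mp hx with rfl | h
    · exact le_trans (foldl_min_le_init ys (min a x)) (min_le_right _ _)
    · exact ih (min a y) x h

theorem le_foldl_min : ∀ (l : List Int) (a c : Int), c ≤ a → (∀ x ∈ l, c ≤ x) → c ≤ l.foldl min a := by
  intro l
  induction l with
  | nil => intro a c ha _; simpa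
  | cons y ys ih =>
    intro a c ha hl
    exact ih (min a y) c (le_min ha (hl y (by simp))) (fun x hx => hl x (by simp [hx]))

theorem match_bipolar_focus_rel_eq (ch_name : String) (focus_rel : List (String × List String)) :
    match_bipolar_focus_rel ch_name focus_rel = match_bipolar_focus_rel_alt ch_name focus_rel := by
  unfold match_bipolar_focus_rel match_bipolar_focus_rel_alt
  rw [show pvNormA = pvNormB from funext pvNorm_eq]
  dsimp only
  set parts := ((PySem.Str.split? (pvNormB ch_name) "-").getD []).map PySem.Str.strip with hparts
  -- rewrite B's fold over raw pieces into a fold over parts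
  have hfold : ((PySem.Str.split? (pvNormB ch_name) "-").getD []).foldl
      (fun b p => min b ((pvBuildIdx focus_rel).getD (PySem.Str.strip p) 3)) 3
      = (parts.map (fun p => (pvBuildIdx focus_rel).getD p 3)).foldl min 3 := by
    rw [hparts, List.foldl_map, List.foldl_map]
  rw [hfold]
  set f := fun p => (pvBuildIdx focus_rel).getD p 3 with hf
  -- A's membership tests as propositions
  have hset : ∀ (label : String) (p : String),
      PySem.Set.contains (PySem.Set.ofList (((focus_rel.lookup label).getD []).map pvNormB)) p
        = decide (p ∈ pvS focus_rel label) := by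
    intro label p
    by_cases h : p ∈ pvS focus_rel label
    · simp only [h, decide_true]
      exact (PySem.Set.contains_iff _ _).mpr (by rwa [PySem.Set.mem_ofList])
    · simp only [h, decide_false]
      rw [← Bool.not_eq_true]
      intro hc
      have hm := (PySem.Set.contains_iff _ _).mp hc
      rw [PySem.Set.mem_ofList] at hm
      exact h hm
  simp only [hset]
  have hchar := pvBuildIdx_getD focus_rel
  by_cases hi : ∃ p ∈ parts, p ∈ pvS focus_rel "i"
  · obtain ⟨p, hp, hpi⟩ := hi
    have hfp : f p = 0 := by simp only [hf]; rw [hchar p]; simp [hpi]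
    have hle : (parts.map f).foldl min 3 ≤ 0 :=
      le_trans (foldl_min_le_of_mem _ 3 (f p) (List.mem_map_of_mem hp)) (le_of_eq hfp)
    have hge : (0 : Int) ≤ (parts.map f).foldl min 3 := by
      apply le_foldl_min _ _ _ (by norm_num)
      intro x hx
      obtain ⟨q, _, rfl⟩ := List.mem_map.mp hx
      simp only [hf]; rw [hchar q]; split_ifs <;> norm_num
    have hbest : (parts.map f).foldl min 3 = 0 := le_antisymm hle hge
    rw [hbest]
    rw [if_pos (by simp [List.any_eq_true]; exact ⟨p, hp, hpi⟩)]
    decide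
  · rw [if_neg (by simp only [List.any_eq_true, decide_eq_true_eq]; exact hi)]
    have hge1 : ∀ q ∈ parts, (1 : Int) ≤ f q := by
      intro q hq
      have hni : q ∉ pvS focus_rel "i" := fun h => hi ⟨q, hq, h⟩
      simp only [hf]; rw [hchar q, if_neg hni]
      split_ifs <;> norm_num
    by_cases hl : ∃ p ∈ parts, p ∈ pvS focus_rel "l"
    · obtain ⟨p, hp, hpl⟩ := hl
      have hfp : f p = 1 := by
        simp only [hf]; rw [hchar p]
        have : p ∉ pvS focus_rel "i" := fun h => hi ⟨p, hp, h⟩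
        simp [this, hpl]
      have hbest : (parts.map f).foldl min 3 = 1 := by
        apply le_antisymm
        · exact le_trans (foldl_min_le_of_mem _ 3 (f p) (List.mem_map_of_mem hp)) (le_of_eq hfp)
        · apply le_foldl_min _ _ _ (by norm_num)
          intro x hx
          obtain ⟨q, hq, rfl⟩ := List.mem_map.mp hx
          exact hge1 q hq
      rw [hbest]
      rw [if_pos (by simp [List.any_eq_true]; exact ⟨p, hp, hpl⟩)]
      decide
    · rw [if_neg (by simp only [List.any_eq_true, decide_eq_true_eq]; exact hl)]
      have hge2 : ∀ q ∈ parts, (2 : Int) ≤ f q := by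
        intro q hq
        simp only [hf]; rw [hchar q]
        have h1 : q ∉ pvS focus_rel "i" := fun h => hi ⟨q, hq, h⟩
        have h2 : q ∉ pvS focus_rel "l" := fun h => hl ⟨q, hq, h⟩
        rw [if_neg h1, if_neg h2]
        split_ifs <;> norm_num
      by_cases he : ∃ p ∈ parts, p ∈ pvS focus_rel "e"
      · obtain ⟨p, hp, hpe⟩ := he
        have hfp : f p = 2 := by
          simp only [hf]; rw [hchar p]
          have h1 : p ∉ pvS focus_rel "i" := fun h => hi ⟨p, hp, h⟩
          have h2 : p ∉ pvS focus_rel "l" := fun h => hl ⟨p, hp, h⟩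
          simp [h1, h2, hpe]
        have hbest : (parts.map f).foldl min 3 = 2 := by
          apply le_antisymm
          · exact le_trans (foldl_min_le_of_mem _ 3 (f p) (List.mem_map_of_mem hp)) (le_of_eq hfp)
          · apply le_foldl_min _ _ _ (by norm_num)
            intro x hx
            obtain ⟨q, hq, rfl⟩ := List.mem_map.mp hx
            exact hge2 q hq
        rw [hbest]
        rw [if_pos (by simp [List.any_eq_true]; exact ⟨p, hp, hpe⟩)]
        decide
      · rw [if_neg (by simp only [List.any_eq_true, decide_eq_true_eq]; exact he)]
        have hbest : (parts.map f).foldl min 3 = 3 := by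
          apply le_antisymm (foldl_min_le_init _ _)
          apply le_foldl_min _ _ _ (le_refl _)
          intro x hx
          obtain ⟨q, hq, rfl⟩ := List.mem_map.mp hx
          simp only [hf]; rw [hchar q]
          have h1 : q ∉ pvS focus_rel "i" := fun h => hi ⟨q, hq, h⟩
          have h2 : q ∉ pvS focus_rel "l" := fun h => hl ⟨q, hq, h⟩
          have h3 : q ∉ pvS focus_rel "e" := fun h => he ⟨q, hq, h⟩
          simp [h1, h2, h3]
        rw [hbest]
        decide

-- ===== VERDICT (by name: the statement is the Claim_ definition above) =====
theorem match_bipolar_focus_rel_spec : Claim_equal_match_bipolar_focus_rel := by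
  intro ch_name focus_rel _
  unfold Spec_match_bipolar_focus_rel
  exact match_bipolar_focus_rel_eq ch_name focus_rel
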